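-- pv_equiv track=rewrite | github.com/WangQiuc/leetcode | contest/2216_2.py | minDeletion
-- ===== SOURCE A (Python) =====
-- from typing import List
--
-- def minDeletion(nums: List[int]) -> int:
--     cnt, px = 0, -1
--     # for even idx, px is previous x, for odd idx, px is -1
--     for x in nums:
--         if x == px:
--             cnt += 1
--         else:
--             # after deletion, next x always in odd idx, px will be set to -1
--             px = x if px < 0 else -1
--     return cnt + (px >= 0)
-- ===== SOURCE B (Python) =====
-- def minDeletion(nums):
--     # pass 1: run-length encode (only lengths are needed: adjacent runs differ by construction)
--     runs = []
--     count = 1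
--     for a, b in zip(nums, nums[1:]):
--         if a == b:
--             count += 1
--         else:
--             runs.append(count)
--             count = 1
--     if nums:
--         runs.append(count)
--     # pass 2: per-run closed form. A run entering at an even kept position keeps its first
--     # element and deletes the other c-1; entering at an odd position it keeps its first
--     # element (its value differs from the pending one), then keeps one more and deletes c-2.
--     dels = 0
--     odd = False
--     for c in runs:
--         if not odd:
--             dels += c - 1
--             odd = True
--         elif c == 1:
--             odd = False
--         else:
--             dels += c - 2
--             odd = True
--     return dels + (1 if odd else 0)
-- ===== Notes on version B (the rewrite author's own statement) =====
-- stated objective: alternative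
-- what changed: B is two staged passes: it first run-length encodes nums (keeping only run lengths, since adjacent runs differ), then computes the deletions per run in O(1) arithmetic with a single parity flag, instead of A's element-by-element greedy scan comparing each element with a -1-sentinel previous value.
-- outside the precondition, e.g. on minDeletion([-2]): A returns 0, B returns 1; on minDeletion([-1, 0]): A returns 2, B returns 0
import Mathlib
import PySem

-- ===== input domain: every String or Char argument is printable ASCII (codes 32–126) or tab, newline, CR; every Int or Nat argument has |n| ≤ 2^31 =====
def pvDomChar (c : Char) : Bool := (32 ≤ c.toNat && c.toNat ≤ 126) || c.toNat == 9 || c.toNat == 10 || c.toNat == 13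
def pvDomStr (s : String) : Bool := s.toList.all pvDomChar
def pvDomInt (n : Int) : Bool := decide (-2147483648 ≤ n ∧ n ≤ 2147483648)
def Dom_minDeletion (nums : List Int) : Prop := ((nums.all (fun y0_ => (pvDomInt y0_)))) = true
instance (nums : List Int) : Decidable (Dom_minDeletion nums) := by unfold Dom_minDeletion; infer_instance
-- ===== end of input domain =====

-- B replaces A's element-by-element greedy scan by two staged passes: run-length encode, then
-- per-run O(1) arithmetic with a parity flag; same asymptotic cost, a different decomposition.

-- ===== PORT A =====
def minDeletion (nums : List Int) : Int :=
  let s := nums.foldl (fun (st : Int × Int) x =>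
    if x = st.2 then (st.1 + 1, st.2)
    else (st.1, if st.2 < 0 then x else -1)) (0, -1)
  s.1 + (if 0 ≤ s.2 then 1 else 0)

-- ===== PORT B =====
def minDeletion_alt (nums : List Int) : Int :=
  -- pass 1: run-length encode (zip of nums with its tail, as in Source B)
  let st := (nums.zip nums.tail).foldl
    (fun (st : List Int × Int) p =>
      if p.1 = p.2 then (st.1, st.2 + 1) else (st.1 ++ [st.2], 1)) ([], 1)
  let runs := if nums = [] then [] else st.1 ++ [st.2]
  -- pass 2: deletions per run with a parity flag
  let s := runs.foldl
    (fun (s : Int × Bool) c =>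
      if !s.2 then (s.1 + c - 1, true)
      else if c = 1 then (s.1, false)
      else (s.1 + c - 2, true)) (0, false)
  s.1 + (if s.2 then 1 else 0)

-- ===== PRECONDITION & SPEC =====
-- Pre_ admits lists that are entirely nonnegative (the problem's natural domain: LeetCode 2216
-- guarantees nums[i] ≥ 1), and also lists with no adjacent equal elements whose negatives sit only
-- at odd indices; excluded are the remaining lists with negatives, where A's -1 parity sentinel can
-- collide with the data and A's returned values are accidents of that encoding (e.g. [-2] → 0,
-- [-1, 0] → 2), while B returns the intended deletion count there.
def Pre_minDeletion (nums : List Int) : Prop :=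
  (∀ x ∈ nums, 0 ≤ x) ∨
  ((∀ p ∈ nums.zip nums.tail, p.1 ≠ p.2) ∧ ∀ i (h : i < nums.length), i % 2 = 0 → 0 ≤ nums[i])
instance (nums : List Int) : Decidable (Pre_minDeletion nums) := by unfold Pre_minDeletion; infer_instance
def pvWitness_minDeletion : List Int := ([1, 1, 2, 3, 3])
def Spec_minDeletion (nums : List Int) (out : Int) : Prop := out = minDeletion_alt nums
instance (nums : List Int) (out : Int) : Decidable (Spec_minDeletion nums out) := by unfold Spec_minDeletion; infer_instance

-- ===== CLAIM (what is proved, stated in full; the proofs are below) =====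
def Claim_equal_minDeletion : Prop := ∀ (nums : List Int), Dom_minDeletion nums → Pre_minDeletion nums → Spec_minDeletion nums (minDeletion nums)

-- ===== LEMMAS AND PROOFS =====

-- the three loop bodies, named for the lemmas
def pvStepA (st : Int × Int) (x : Int) : Int × Int :=
  if x = st.2 then (st.1 + 1, st.2) else (st.1, if st.2 < 0 then x else -1)

def pvRle (st : List Int × Int) (p : Int × Int) : List Int × Int :=
  if p.1 = p.2 then (st.1, st.2 + 1) else (st.1 ++ [st.2], 1)

def pvRun (s : Int × Bool) (c : Int) : Int × Bool :=
  if !s.2 then (s.1 + c - 1, true)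
  else if c = 1 then (s.1, false)
  else (s.1 + c - 2, true)

-- zip-with-tail of a snoc
lemma pv_zipTail_snoc : ∀ (p : List Int) (x : Int) (h : p ≠ []),
    (p ++ [x]).zip (p ++ [x]).tail = p.zip p.tail ++ [(p.getLast h, x)] := by
  intro p
  induction p with
  | nil => intro x h; exact absurd rfl h
  | cons a t ih =>
    intro x _
    cases t with
    | nil => simp
    | cons b u =>
      have := ih x (by simp)
      simp only [List.cons_append, List.zip_cons_cons, List.tail_cons] at this ⊢
      rw [this]
      simp [List.getLast]

-- Main invariant for the all-nonnegative branch: A's fold state is determined by B's two passes.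
lemma pv_inv1 : ∀ (nums : List Int) (h : nums ≠ []), (∀ y ∈ nums, 0 ≤ y) →
    1 ≤ ((nums.zip nums.tail).foldl pvRle ([], 1)).2 ∧
    nums.foldl pvStepA (0, -1) =
      (let rc := (nums.zip nums.tail).foldl pvRle ([], 1)
       let S := (rc.1 ++ [rc.2]).foldl pvRun (0, false)
       (S.1, if S.2 then nums.getLast h else -1)) := by
  intro nums
  induction nums using List.reverseRecOn with
  | nil => intro h; exact absurd rfl h
  | append_singleton p x ih =>
    intro h hn
    have hx : 0 ≤ x := hn x (by simp)
    by_cases hp : p = []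
    · subst hp
      refine ⟨by simp, ?_⟩
      simp only [List.nil_append, List.zip_nil_right, List.foldl_nil, List.foldl_cons, List.tail_cons]
      rw [show pvStepA (0, -1) x = (0, x) by
        simp only [pvStepA]; rw [if_neg (by omega), if_pos (by omega)]]
      simp [pvRun, List.getLast]
    · obtain ⟨hc, hA⟩ := ih hp (fun y hy => hn y (by simp [hy]))
      simp only at hA
      have hzip := pv_zipTail_snoc p x hp
      have hlast : (p ++ [x]).getLast h = x := by simp
      have hv0 : 0 ≤ p.getLast hp := hn _ (by simp [List.getLast_mem hp])
      simp only [hzip, List.foldl_append, List.foldl_cons, List.foldl_nil, hlast, hA]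
      revert hc
      generalize hRC : List.foldl pvRle ([], (1 : Int)) (p.zip p.tail) = RC
      obtain ⟨rs, c⟩ := RC
      intro hc
      by_cases hxv : x = p.getLast hp
      · rw [show pvRle (rs, c) (p.getLast hp, x) = (rs, c + 1) by simp [pvRle, hxv]]
        refine ⟨by simpa using by omega, ?_⟩
        generalize List.foldl pvRun ((0 : Int), false) rs = SB
        obtain ⟨d, b⟩ := SB
        simp only at hc
        cases b with
        | false =>
          rw [show pvRun (d, false) c = (d + c - 1, true) by simp [pvRun]]
          rw [show pvRun (d, false) (c + 1) = (d + c, true) by simp [pvRun]; ring]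
          simp only [if_true]
          rw [show pvStepA (d + c - 1, p.getLast hp) x = (d + c - 1 + 1, p.getLast hp) by
            simp only [pvStepA]; rw [if_pos hxv]]
          rw [← hxv]
          congr 1
          ring
        | true =>
          by_cases h1 : c = 1
          · rw [show pvRun (d, true) c = (d, false) by simp [pvRun, h1]]
            rw [show pvRun (d, true) (c + 1) = (d, true) by
              simp only [pvRun, h1]; norm_num]
            simp only [Bool.false_eq_true, if_false, if_true]
            rw [show pvStepA (d, -1) x = (d, x) by
              simp only [pvStepA]; rw [if_neg (by omega), if_pos (by omega)]]
          · rw [show pvRun (d, true) c = (d + c - 2, true) by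
              simp only [pvRun]; rw [if_neg (by simp), if_neg h1]]
            rw [show pvRun (d, true) (c + 1) = (d + c - 1, true) by
              simp only [pvRun]; rw [if_neg (by simp), if_neg (by omega)]; congr 1; ring]
            simp only [if_true]
            rw [show pvStepA (d + c - 2, p.getLast hp) x = (d + c - 2 + 1, p.getLast hp) by
              simp only [pvStepA]; rw [if_pos hxv]]
            rw [← hxv]
            congr 1
            ring
      · rw [show pvRle (rs, c) (p.getLast hp, x) = (rs ++ [c], 1) by
          simp only [pvRle]; rw [if_neg (by simpa using fun hh => hxv hh.symm)]]
        refine ⟨by simp, ?_⟩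
        simp only [List.foldl_append, List.foldl_cons, List.foldl_nil]
        generalize List.foldl pvRun ((0 : Int), false) rs = SB
        generalize pvRun SB c = SP
        obtain ⟨d, b⟩ := SP
        cases b with
        | false =>
          rw [show pvRun (d, false) 1 = (d, true) by simp [pvRun]]
          simp only [Bool.false_eq_true, if_false, if_true]
          rw [show pvStepA (d, -1) x = (d, x) by
            simp only [pvStepA]; rw [if_neg (by omega), if_pos (by omega)]]
        | true =>
          rw [show pvRun (d, true) 1 = (d, false) by simp [pvRun]]
          simp only [Bool.false_eq_true, if_false, if_true]
          rw [show pvStepA (d, p.getLast hp) x = (d, -1) by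
            simp only [pvStepA]; rw [if_neg hxv, if_neg (by omega)]]

-- adjacent-distinct branch, A side: the counter never moves and the final px sign is the parity
lemma pv_inv2 : ∀ (nums : List Int) (cnt px : Int) (b : Bool),
    (∀ p ∈ nums.zip nums.tail, p.1 ≠ p.2) →
    (∀ i (h : i < nums.length), ((if b then 1 else 0) + i) % 2 = 0 → 0 ≤ nums[i]) →
    (b = false → px = -1) → (b = true → 0 ≤ px ∧ ∀ y ∈ nums.head?, y ≠ px) →
    (nums.foldl pvStepA (cnt, px)).1 = cnt ∧
    (0 ≤ (nums.foldl pvStepA (cnt, px)).2 ↔ ((if b then 1 else 0) + nums.length) % 2 = 1) := by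
  intro nums
  induction nums with
  | nil =>
    intro cnt px b _ _ h0 h1
    cases b with
    | false => have := h0 rfl; subst this; simp
    | true => obtain ⟨hpx, _⟩ := h1 rfl; simp [hpx]
  | cons x rest ih =>
    intro cnt px b hadj hidx h0 h1
    have hadj' : ∀ p ∈ rest.zip rest.tail, p.1 ≠ p.2 := by
      intro p hp
      apply hadj
      cases rest with
      | nil => simp at hp
      | cons y t =>
        simp only [List.tail_cons, List.zip_cons_cons]
        exact List.mem_cons_of_mem _ (by simpa using hp)
    have hhead : ∀ y ∈ rest.head?, x ≠ y := by
      intro y hy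
      cases rest with
      | nil => simp at hy
      | cons z t =>
        have hyz : z = y := by simpa using hy
        subst hyz
        exact hadj (x, z) (by simp)
    cases b with
    | false =>
      have hpx : px = -1 := h0 rfl
      subst hpx
      have hx : 0 ≤ x := by simpa using hidx 0 (by simp) (by simp)
      have hA : pvStepA (cnt, -1) x = (cnt, x) := by
        simp only [pvStepA]
        rw [if_neg (by omega), if_pos (by omega)]
      rw [List.foldl_cons, hA]
      have hidx' : ∀ i (h : i < rest.length), ((if true then 1 else 0) + i) % 2 = 0 → 0 ≤ rest[i] := by
        intro i h hp
        have := hidx (i + 1) (by simpa using Nat.succ_lt_succ h) (by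
          simp only [Bool.false_eq_true, if_false, reduceIte] at hp ⊢
          omega)
        simpa using this
      have := ih cnt x true hadj' hidx' (by simp) (by
        intro _
        exact ⟨hx, fun y hy => (hhead y hy).symm⟩)
      refine ⟨this.1, ?_⟩
      rw [this.2]
      simp only [List.length_cons, Bool.false_eq_true, if_false, reduceIte]
      omega
    | true =>
      obtain ⟨hpx, hne⟩ := h1 rfl
      have hxpx : x ≠ px := hne x (by simp)
      have hA : pvStepA (cnt, px) x = (cnt, -1) := by
        simp only [pvStepA]
        rw [if_neg hxpx, if_neg (by omega)]
      rw [List.foldl_cons, hA]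
      have hidx' : ∀ i (h : i < rest.length), ((if false then 1 else 0) + i) % 2 = 0 → 0 ≤ rest[i] := by
        intro i h hp
        have := hidx (i + 1) (by simpa using Nat.succ_lt_succ h) (by
          simp only [Bool.false_eq_true, if_false, reduceIte] at hp ⊢
          omega)
        simpa using this
      have := ih cnt (-1) false hadj' hidx' (fun _ => rfl) (by intro h; cases h)
      refine ⟨this.1, ?_⟩
      rw [this.2]
      simp only [List.length_cons, Bool.false_eq_true, if_false, reduceIte]
      omega

-- adjacent-distinct branch, B side: all runs have length 1
lemma pv_rle_distinct : ∀ (ps : List (Int × Int)) (acc : List Int),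
    (∀ p ∈ ps, p.1 ≠ p.2) →
    ps.foldl pvRle (acc, 1) = (acc ++ List.replicate ps.length 1, 1) := by
  intro ps
  induction ps with
  | nil => intro acc _; simp
  | cons p t ih =>
    intro acc hd
    have hp : p.1 ≠ p.2 := hd p (by simp)
    have ht : ∀ q ∈ t, q.1 ≠ q.2 := fun q hq => hd q (by simp [hq])
    simp only [List.foldl_cons, pvRle, if_neg hp]
    rw [ih (acc ++ [1]) ht]
    simp [List.replicate_succ, List.append_assoc]

lemma pv_run_ones : ∀ (m : Nat) (d : Int) (b : Bool),
    (List.replicate m (1 : Int)).foldl pvRun (d, b) =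
      (d, decide (((if b then 1 else 0) + m) % 2 = 1)) := by
  intro m
  induction m with
  | zero => intro d b; cases b <;> simp
  | succ k ih =>
    intro d b
    rw [List.replicate_succ, List.foldl_cons]
    cases b with
    | false =>
      have : pvRun (d, false) 1 = (d, true) := by simp [pvRun]
      rw [this, ih]
      congr 1
      simp only [decide_eq_decide, Bool.false_eq_true, if_false, reduceIte]
      omega
    | true =>
      have : pvRun (d, true) 1 = (d, false) := by simp [pvRun]
      rw [this, ih]
      congr 1
      simp only [decide_eq_decide, Bool.false_eq_true, if_false, reduceIte]
      omega

-- ===== VERDICT (by name: the statement is the Claim_ definition above) =====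
theorem minDeletion_spec : Claim_equal_minDeletion := by
  intro nums _ hpre
  unfold Spec_minDeletion minDeletion minDeletion_alt
  have hfa : (fun (st : Int × Int) x =>
      if x = st.2 then (st.1 + 1, st.2)
      else (st.1, if st.2 < 0 then x else -1)) = pvStepA := rfl
  have hfr : (fun (st : List Int × Int) (p : Int × Int) =>
      if p.1 = p.2 then (st.1, st.2 + 1) else (st.1 ++ [st.2], 1)) = pvRle := rfl
  have hfs : (fun (s : Int × Bool) (c : Int) =>
      if !s.2 then (s.1 + c - 1, true)
      else if c = 1 then (s.1, false)
      else (s.1 + c - 2, true)) = pvRun := rfl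
  simp only [hfa, hfr, hfs]
  by_cases hnil : nums = []
  · subst hnil
    simp
  · rw [if_neg hnil]
    rcases hpre with hnn | ⟨hadj, hidx⟩
    · obtain ⟨hc, hA⟩ := pv_inv1 nums hnil hnn
      simp only at hA
      rw [hA]
      have hv0 : 0 ≤ nums.getLast hnil := hnn _ (List.getLast_mem hnil)
      simp only
      split_ifs <;> omega
    · have hrle := pv_rle_distinct (nums.zip nums.tail) [] hadj
      have hlen : (nums.zip nums.tail).length = nums.length - 1 := by
        simp [List.length_zip]
      rw [hlen] at hrle
      rw [hrle]
      simp only [List.nil_append]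
      have hrep : List.replicate (nums.length - 1) (1 : Int) ++ [(1 : Int)]
          = List.replicate nums.length (1 : Int) := by
        rw [← List.replicate_succ']
        congr 1
        have : nums.length ≠ 0 := fun hh => hnil (List.length_eq_zero_iff.mp hh)
        omega
      simp only [hrep, pv_run_ones]
      obtain ⟨h1, h2⟩ := pv_inv2 nums 0 (-1) false hadj
        (by intro i hh hp; apply hidx i hh; simpa using hp)
        (fun _ => rfl) (by intro hh; cases hh)
      simp only [Bool.false_eq_true, if_false] at h2 ⊢
      rw [h1]
      by_cases hpar : (0 + nums.length) % 2 = 1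
      · rw [if_pos (h2.mpr hpar), if_pos (by simpa using hpar)]
      · rw [if_neg (fun hh => hpar (h2.mp hh)), if_neg (by simpa using hpar)]
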